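-- pv_equiv track=rewrite | github.com/Enjef/Algo | 1900 - 1999/1945 - Sum of Digits of String After Convert/1945 - Sum of Digits of String After Convert.py | getLucky_memory_best
-- ===== SOURCE A (Python) =====
-- def getLucky_memory_best(s, k):
--     dic = {}
--     for i in range(1, 27):
--         dic[chr(i+96)] = i
--     nums = ''
--     for i in s:
--         nums += str(dic[i])
--     x = 0
--     while k:
--         for i in nums:
--             x += int(i)
--         nums = str(x)
--         x = 0
--         k -= 1
--     return nums
-- ===== SOURCE B (Python) =====
-- def getLucky_memory_best(s, k):
--     if k == 0:
--         return ''.join(str(ord(c) - 96) for c in s)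
--     total = 0
--     for c in s:
--         v = ord(c) - 96
--         while v:
--             total += v % 10
--             v //= 10
--     for _ in range(k - 1):
--         v = total
--         total = 0
--         while v:
--             total += v % 10
--             v //= 10
--     return str(total)
-- ===== Notes on version B (the rewrite author's own statement) =====
-- stated objective: faster
-- what changed: B never builds or re-scans the expanded digit string: for k>=1 it sums each letter's 1..26 index digits directly and performs the remaining k-1 digit-sum passes on a running integer with % 10 and // 10, with k==0 returned as the direct concatenation; A builds a dict, a digit string, and re-parses it character-by-character with int() each pass.
import Mathlib
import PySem

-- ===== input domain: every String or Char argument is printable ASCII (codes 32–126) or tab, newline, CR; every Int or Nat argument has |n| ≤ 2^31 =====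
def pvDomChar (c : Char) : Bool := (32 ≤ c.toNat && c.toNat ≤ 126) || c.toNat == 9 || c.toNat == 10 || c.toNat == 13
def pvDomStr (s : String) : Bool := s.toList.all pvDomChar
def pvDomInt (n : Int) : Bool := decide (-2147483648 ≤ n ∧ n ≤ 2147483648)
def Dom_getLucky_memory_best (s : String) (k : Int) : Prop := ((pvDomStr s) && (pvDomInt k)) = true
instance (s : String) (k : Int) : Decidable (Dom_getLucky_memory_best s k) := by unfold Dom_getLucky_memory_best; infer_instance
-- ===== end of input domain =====

-- B's change (objective: alternative/faster passes): after the first pass B keeps a running INTEGER and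
-- extracts digits with % 10 and // 10 instead of rebuilding and re-scanning a digit string each round;
-- k == 0 is returned directly as the concatenated letter indices. Equivalence is proved on Pre_
-- (all-lowercase s, k ≥ 0): elsewhere A raises KeyError or loops forever.

-- ===== PORT A =====
-- dic = {chr(i+96): i for i in range(1, 27)}; Char.ofNat is exact for chr on 0 ≤ n < 0x110000
def dicA : PySem.Dict Char Int :=
  (PySem.List.pyRange 1 27 1).foldl (fun d i => d.insert (Char.ofNat (i + 96).toNat) i) PySem.Dict.empty

-- 'while k: … ; k -= 1' runs exactly k.toNat times when k ≥ 0 (Pre_); for k < 0 the Python diverges.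
def loopA : Nat → List Char → List Char
  | 0, nums => nums
  | m + 1, nums =>
      loopA m (PySem.Int.toChars (nums.foldl (fun x c => x + (PySem.Int.ofChars? [c]).getD 0) 0))

def getLucky_memory_best (s : String) (k : Int) : String :=
  -- dic[i] raises KeyError for non-lowercase chars (excluded by Pre_); .getD 0 stands for the raise
  let nums := s.toList.foldl (fun ns c => ns ++ PySem.Int.toChars ((dicA.get? c).getD 0)) []
  String.ofList (loopA k.toNat nums)

-- ===== PORT B =====
-- 'while v: total += v % 10; v //= 10' — v = ord(c) - 96 ≥ 1 under Pre_, so Nat arithmetic is exact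
def dsLoop (total : Nat) (v : Nat) : Nat :=
  if v = 0 then total else dsLoop (total + v % 10) (v / 10)
decreasing_by exact Nat.div_lt_self (Nat.pos_of_ne_zero (by assumption)) (by omega)

def getLucky_memory_best_alt (s : String) (k : Int) : String :=
  if k = 0 then
    String.ofList (PySem.Chars.join [] (s.toList.map (fun c => PySem.Int.toChars ((c.toNat : Int) - 96))))
  else
    let total := s.toList.foldl (fun t c => dsLoop t (c.toNat - 96)) 0
    let total := (PySem.List.pyRange 0 (k - 1) 1).foldl (fun t _ => dsLoop 0 t) total
    PySem.Int.toStr (total : Int)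

-- ===== PRECONDITION & SPEC =====
-- Pre_: on non-lowercase characters A raises KeyError; for k < 0 A's 'while k' never terminates.
def Pre_getLucky_memory_best (s : String) (k : Int) : Prop :=
  0 ≤ k ∧ s.toList.all (fun c => 97 ≤ c.toNat && c.toNat ≤ 122) = true
instance (s : String) (k : Int) : Decidable (Pre_getLucky_memory_best s k) := by
  unfold Pre_getLucky_memory_best; infer_instance

def pvWitness_getLucky_memory_best : String × Int := ("leetcode", 2)

def Spec_getLucky_memory_best (s : String) (k : Int) (out : String) : Prop := out = getLucky_memory_best_alt s k
instance (s : String) (k : Int) (out : String) : Decidable (Spec_getLucky_memory_best s k out) := by unfold Spec_getLucky_memory_best; infer_instance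

-- ===== CLAIM (what is proved, stated in full; the proofs are below) =====
def Claim_equal_getLucky_memory_best : Prop := ∀ (s : String) (k : Int), Dom_getLucky_memory_best s k → Pre_getLucky_memory_best s k → Spec_getLucky_memory_best s k (getLucky_memory_best s k)

-- ===== LEMMAS AND PROOFS =====

-- pure digit sum, the common value of A's string scan and B's mod-loop
def digSum (n : Nat) : Nat :=
  if n = 0 then 0 else n % 10 + digSum (n / 10)
decreasing_by exact Nat.div_lt_self (Nat.pos_of_ne_zero (by assumption)) (by omega)

theorem dsLoop_eq (t v : Nat) : dsLoop t v = t + digSum v := by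
  induction v using Nat.strong_induction_on generalizing t with
  | _ v ih =>
    rw [dsLoop, digSum]
    by_cases h : v = 0
    · simp [h]
    · simp only [h, if_false]
      rw [ih (v / 10) (Nat.div_lt_self (Nat.pos_of_ne_zero h) (by omega)) (t + v % 10)]
      omega

theorem digSum_lt10 (n : Nat) (h : n < 10) : digSum n = n := by
  rw [digSum]
  by_cases h0 : n = 0
  · simp [h0]
  · have h1 : n / 10 = 0 := Nat.div_eq_of_lt h
    have h2 : n % 10 = n := Nat.mod_eq_of_lt h
    rw [digSum] at *
    simp [h0, h1, h2]

theorem dval_digitChar (d : Nat) (h : d < 10) :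
    (PySem.Int.ofChars? [d.digitChar]).getD 0 = (d : Int) := by
  interval_cases d <;> decide

-- A's inner 'for i in nums: x += int(i)' over str(n) computes digSum n
theorem scan_toDigits (n : Nat) (x0 : Int) :
    (Nat.toDigits 10 n).foldl (fun x c => x + (PySem.Int.ofChars? [c]).getD 0) x0
      = x0 + (digSum n : Int) := by
  induction n using Nat.strong_induction_on generalizing x0 with
  | _ n ih =>
    by_cases h : n < 10
    · rw [Nat.toDigits_of_lt_base h]
      simp [List.foldl, dval_digitChar n h, digSum_lt10 n h]
    · rw [Nat.toDigits_eq_if (by omega : 1 < 10)]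
      simp only [h, if_false]
      rw [List.foldl_append, ih (n / 10) (Nat.div_lt_self (by omega) (by omega)) x0,
          List.foldl_cons, List.foldl_nil, dval_digitChar (n % 10) (Nat.mod_lt n (by omega))]
      conv_rhs => rw [digSum]
      have hne : ¬ n = 0 := by omega
      simp only [hne, if_false]
      push_cast
      ring

theorem scan_toChars (n : Nat) (x0 : Int) :
    (PySem.Int.toChars (n : Int)).foldl (fun x c => x + (PySem.Int.ofChars? [c]).getD 0) x0
      = x0 + (digSum n : Int) := by
  rw [PySem.Int.toChars]
  simp only [Int.toNat_natCast]
  rw [if_neg (by omega)]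
  exact scan_toDigits n x0

-- the 26-entry dict looked up at a lowercase letter
theorem dicA_get (c : Char) (h1' : 97 ≤ c.toNat) (h2' : c.toNat ≤ 122) :
    dicA.get? c = some ((c.toNat : Int) - 96) := by
  have hc : c = Char.ofNat c.toNat := (Char.ofNat_toNat c).symm
  rw [hc]
  generalize hn : c.toNat = n at h1' h2' ⊢
  interval_cases n <;> decide

theorem chars_join_nil_flatten (l : List (List Char)) : PySem.Chars.join [] l = l.flatten := by
  induction l with
  | nil => rfl
  | cons x xs ih =>
    cases xs with
    | nil => simp [PySem.Chars.join, List.intercalate]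
    | cons y ys =>
      simp [PySem.Chars.join, List.intercalate] at ih ⊢
      simpa using ih

-- A's first pass builds the concatenation of the per-letter digit strings
theorem numsA_eq (cs : List Char) (h : ∀ c ∈ cs, 97 ≤ c.toNat ∧ c.toNat ≤ 122) :
    cs.foldl (fun ns c => ns ++ PySem.Int.toChars ((dicA.get? c).getD 0)) []
      = cs.flatMap (fun c => PySem.Int.toChars ((c.toNat : Int) - 96)) := by
  rw [PySem.List.foldl_congr_mem
        (g := fun ns c => ns ++ PySem.Int.toChars ((c.toNat : Int) - 96))]
  · exact PySem.List.foldl_append_eq_flatMap _ cs []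
  · intro acc c hc
    rw [dicA_get c (h c hc).1 (h c hc).2]
    rfl

theorem lower_idx_cast (c : Char) (h1 : 97 ≤ c.toNat) :
    ((c.toNat : Int) - 96) = ((c.toNat - 96 : Nat) : Int) := by
  omega

-- sum of all digit characters of the concatenated string = B's per-letter mod-loop total
theorem scan_flatMap (cs : List Char) (h : ∀ c ∈ cs, 97 ≤ c.toNat ∧ c.toNat ≤ 122) (x0 : Int) (t0 : Nat) :
    (cs.flatMap (fun c => PySem.Int.toChars ((c.toNat : Int) - 96))).foldl
        (fun x c => x + (PySem.Int.ofChars? [c]).getD 0) x0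
      = x0 + ((cs.foldl (fun t c => dsLoop t (c.toNat - 96)) t0 : Nat) : Int) - (t0 : Int) := by
  induction cs generalizing x0 t0 with
  | nil => simp
  | cons c cs ih =>
    simp only [List.flatMap_cons, List.foldl_append, List.foldl_cons]
    rw [lower_idx_cast c (h c (by simp)).1]
    rw [scan_toChars (c.toNat - 96) x0]
    rw [ih (fun d hd => h d (by simp [hd])) _ (dsLoop t0 (c.toNat - 96))]
    rw [dsLoop_eq t0 (c.toNat - 96)]
    push_cast
    ring

-- A's remaining passes iterate digSum on the running value
theorem loopA_toChars (m : Nat) (n : Nat) :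
    loopA m (PySem.Int.toChars (n : Int)) = PySem.Int.toChars ((digSum^[m] n : Nat) : Int) := by
  induction m generalizing n with
  | zero => simp [loopA]
  | succ m ih =>
    rw [loopA, scan_toChars n 0, Int.zero_add, ih (digSum n)]
    rw [Function.iterate_succ_apply]

-- B's second loop iterates digSum (k-1) times
theorem foldl_dsLoop_iterate (l : List Int) (t : Nat) :
    l.foldl (fun t _ => dsLoop 0 t) t = digSum^[l.length] t := by
  induction l generalizing t with
  | nil => rfl
  | cons x xs ih =>
    rw [List.foldl_cons, ih (dsLoop 0 t), dsLoop_eq 0 t, Nat.zero_add,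
        List.length_cons, Function.iterate_succ_apply]

-- ===== VERDICT (by name: the statement is the Claim_ definition above) =====
theorem getLucky_memory_best_spec : Claim_equal_getLucky_memory_best := by
  intro s k _ hPre
  obtain ⟨hk, hlowB⟩ := hPre
  have hlow : ∀ c ∈ s.toList, 97 ≤ c.toNat ∧ c.toNat ≤ 122 := by
    intro c hc
    have := List.all_eq_true.mp hlowB c hc
    simpa using this
  unfold Spec_getLucky_memory_best getLucky_memory_best getLucky_memory_best_alt
  simp only []
  rw [numsA_eq s.toList hlow]
  by_cases hk0 : k = 0
  · subst hk0
    simp only [Int.toNat_zero, loopA]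
    rw [chars_join_nil_flatten]
    congr 1
  · rw [if_neg hk0]
    obtain ⟨m, hm⟩ : ∃ m : Nat, k.toNat = m + 1 := by
      have : 0 < k.toNat := by omega
      exact ⟨k.toNat - 1, by omega⟩
    rw [hm, loopA]
    rw [scan_flatMap s.toList hlow 0 0]
    simp only [Nat.cast_zero, Int.zero_add, Int.sub_zero]
    rw [loopA_toChars]
    rw [foldl_dsLoop_iterate]
    rw [PySem.List.length_pyRange_one]
    have hlen : (k - 1 - 0).toNat = m := by omega
    rw [hlen]
    rfl
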